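-- pv_equiv track=rewrite | github.com/Kwan-Lab/aboharbdavoudian2025 | functionScripts/helperFunctions.py | conciseStringReport
-- ===== SOURCE A (Python) =====
-- def conciseStringReport(strings, counts):
--
--     # Create a dictionary by zipping the two lists
--     data_dict = dict(zip(strings, counts))
--
--     # Create a reverse dictionary with counts as keys and list of strings as values
--     reverse_dict = {}
--     for key, value in data_dict.items():
--         if value not in reverse_dict:
--             reverse_dict[value] = []
--         reverse_dict[value].append(key)
--
--     myKeys = list(reverse_dict.keys())
--     myKeys.sort()
--     reverse_dict = {i: reverse_dict[i] for i in myKeys}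
--
--     # Initialize an empty string to store the result
--     result_string = ""
--
--     # Iterate over the reverse dictionary and append the key-value pairs to the result_string
--     for count, string_list in reverse_dict.items():
--         string_group = ', '.join(string_list)
--         result_string += f"Present {count}x: {len(string_list)} - {string_group}\n"
--
--     # Remove the last comma and space from the result_string
--     result_string = result_string + '\n '
--
--     return result_string
-- ===== SOURCE B (Python) =====
-- def conciseStringReport(strings, counts):
--     # Stable-sort the deduplicated (string, count) pairs by count, then walk
--     # consecutive equal-count runs, emitting one line per run.
--     items = sorted(dict(zip(strings, counts)).items(), key=lambda kv: kv[1])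
--     lines = []
--     i = 0
--     n = len(items)
--     while i < n:
--         c = items[i][1]
--         group = []
--         while i < n and items[i][1] == c:
--             group.append(items[i][0])
--             i += 1
--         lines.append(f"Present {c}x: {len(group)} - {', '.join(group)}\n")
--     return ''.join(lines) + '\n '
-- ===== Notes on version B (the rewrite author's own statement) =====
-- stated objective: alternative
-- what changed: B stable-sorts the deduplicated (string,count) pairs by count once and walks consecutive equal-count runs, instead of A's building a count->strings reverse dictionary, sorting its keys, and rebuilding a second dictionary before rendering.
import Mathlib
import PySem

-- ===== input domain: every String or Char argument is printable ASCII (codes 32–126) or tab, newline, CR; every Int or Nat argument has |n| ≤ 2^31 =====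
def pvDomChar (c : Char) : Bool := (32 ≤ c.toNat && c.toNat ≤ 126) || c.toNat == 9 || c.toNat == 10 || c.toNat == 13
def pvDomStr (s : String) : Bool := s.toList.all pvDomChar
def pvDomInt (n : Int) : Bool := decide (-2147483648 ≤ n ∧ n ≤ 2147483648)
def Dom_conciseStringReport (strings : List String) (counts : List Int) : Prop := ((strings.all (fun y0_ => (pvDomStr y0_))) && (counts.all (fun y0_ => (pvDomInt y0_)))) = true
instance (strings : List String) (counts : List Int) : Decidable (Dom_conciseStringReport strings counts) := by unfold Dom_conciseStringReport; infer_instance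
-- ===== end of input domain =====

-- One line: B replaces A's reverse-dictionary + key-sort + dictionary rebuild by one
-- stable sort of the deduplicated pairs by count followed by a walk over equal-count runs
-- (alternative decomposition, same cost class).

-- ===== PORT A =====
def conciseStringReport (strings : List String) (counts : List Int) : String :=
  -- data_dict = dict(zip(strings, counts))
  let dataDict : PySem.Dict String Int :=
    (strings.zip counts).foldl (fun d p => d.insert p.1 p.2) PySem.Dict.empty
  -- reverse_dict loop: if value not in reverse_dict: reverse_dict[value] = []; reverse_dict[value].append(key)
  let reverseDict : PySem.Dict Int (List String) :=
    dataDict.items.foldl (fun d p =>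
      let d' := if d.contains p.2 then d else d.insert p.2 ([] : List String)
      d'.modify p.2 [] (fun l => l ++ [p.1])) PySem.Dict.empty
  -- myKeys = list(reverse_dict.keys()); myKeys.sort()
  let myKeys := PySem.List.sorted reverseDict.keys (fun x => x) false
  -- reverse_dict = {i: reverse_dict[i] for i in myKeys}; every i comes from reverse_dict's
  -- own keys, so the Python lookup reverse_dict[i] always succeeds: getD is exact here.
  let reverseDict2 : PySem.Dict Int (List String) :=
    myKeys.foldl (fun d i => d.insert i (reverseDict.getD i [])) PySem.Dict.empty
  -- result_string accumulation loop over reverse_dict.items()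
  let resultString :=
    reverseDict2.items.foldl (fun acc p =>
      acc ++ "Present " ++ PySem.Int.toStr p.1 ++ "x: " ++
        PySem.Int.toStr (PySem.List.len p.2) ++ " - " ++
        PySem.Str.join ", " p.2 ++ "\n") ""
  resultString ++ "\n "

-- ===== PORT B =====
-- inner while: 'while rest and rest[0][1] == c: group.append(rest[0][0]); rest = rest[1:]'
def pvInnerB (c : Int) (rest : List (String × Int)) (group : List String) :
    List String × List (String × Int) :=
  match rest with
  | [] => (group, [])
  | p :: tl => if p.2 == c then pvInnerB c tl (group ++ [p.1]) else (group, p :: tl)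

theorem pvInnerB_len (c : Int) (rest : List (String × Int)) (group : List String) :
    (pvInnerB c rest group).2.length ≤ rest.length := by
  induction rest generalizing group with
  | nil => simp [pvInnerB]
  | cons p tl ih =>
    simp only [pvInnerB]
    split
    · exact le_trans (ih _) (Nat.le_succ _)
    · simp

-- outer while over the sorted pairs; the first inner iteration always fires
-- (rest[0][1] == c by construction), so the head is consumed before recursing.
def pvRunsB (rest : List (String × Int)) (lines : List String) : List String :=
  match rest with
  | [] => lines
  | p :: tl =>
    let c := p.2
    let r := pvInnerB c tl [p.1]
    pvRunsB r.2 (lines ++ ["Present " ++ PySem.Int.toStr c ++ "x: " ++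
      PySem.Int.toStr (PySem.List.len r.1) ++ " - " ++
      PySem.Str.join ", " r.1 ++ "\n"])
termination_by rest.length
decreasing_by
  simp only [List.length_cons]
  exact Nat.lt_succ_of_le (pvInnerB_len _ _ _)

def conciseStringReport_alt (strings : List String) (counts : List Int) : String :=
  -- rest = sorted(dict(zip(strings, counts)).items(), key=lambda kv: kv[1])
  let rest := PySem.List.sorted
    ((strings.zip counts).foldl (fun d p => d.insert p.1 p.2)
      (PySem.Dict.empty : PySem.Dict String Int)).items (fun kv => kv.2) false
  PySem.Str.join "" (pvRunsB rest []) ++ "\n "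

-- ===== PRECONDITION & SPEC =====
def Spec_conciseStringReport (strings : List String) (counts : List Int) (out : String) : Prop := out = conciseStringReport_alt strings counts
instance (strings : List String) (counts : List Int) (out : String) : Decidable (Spec_conciseStringReport strings counts out) := by unfold Spec_conciseStringReport; infer_instance

-- ===== CLAIM (what is proved, stated in full; the proofs are below) =====
def Claim_equal_conciseStringReport : Prop := ∀ (strings : List String) (counts : List Int), Dom_conciseStringReport strings counts → Spec_conciseStringReport strings counts (conciseStringReport strings counts)


-- ===== LEMMAS AND PROOFS =====

theorem pv_getD_of_not_contains {κ ν : Type} [BEq κ] [LawfulBEq κ]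
    (d : PySem.Dict κ ν) (k : κ) (d0 : ν) (h : d.contains k = false) :
    d.getD k d0 = d0 := by
  unfold PySem.Dict.getD
  rw [(PySem.Dict.get?_eq_none_iff_contains d k).mpr h]
  rfl

theorem pv_contains_false_iff {κ ν : Type} [BEq κ] [LawfulBEq κ]
    (d : PySem.Dict κ ν) (k : κ) :
    d.contains k = false ↔ ∀ p ∈ d.items, (p.1 == k) = false := by
  unfold PySem.Dict.contains
  rw [List.any_eq_false]
  simp

theorem pv_insert_insert {κ ν : Type} [BEq κ] [LawfulBEq κ]
    (d : PySem.Dict κ ν) (k : κ) (v w : ν) (h : d.contains k = false) :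
    (d.insert k v).insert k w = d.insert k w := by
  have hall := (pv_contains_false_iff d k).mp h
  have h1 : (d.insert k v) = PySem.Dict.mk (d.items ++ [(k, v)]) := by
    unfold PySem.Dict.insert; rw [h]; simp
  have hc : (PySem.Dict.mk (d.items ++ [(k, v)])).contains k = true := by
    unfold PySem.Dict.contains; simp
  rw [h1]
  unfold PySem.Dict.insert
  rw [hc, h]
  simp only [if_true, Bool.false_eq_true, if_false]
  congr 1
  rw [List.map_append]
  have : List.map (fun p => if (p.1 == k) = true then (k, w) else p) d.items = d.items := by
    refine (List.map_congr_left ?_).trans (List.map_id _)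
    intro p hp; simp [hall p hp]
  simp [this]

theorem pv_contains_insert_of_ne {κ ν : Type} [BEq κ] [LawfulBEq κ]
    (d : PySem.Dict κ ν) (k i : κ) (v : ν)
    (hd : d.contains i = false) (hne : k ≠ i) :
    (d.insert k v).contains i = false := by
  have hall := (pv_contains_false_iff d i).mp hd
  rw [pv_contains_false_iff]
  unfold PySem.Dict.insert
  by_cases h : d.contains k = true
  · rw [if_pos h]
    intro p hp
    obtain ⟨q, hq, hpq⟩ := List.mem_map.mp hp
    by_cases hk : (q.1 == k) = true
    · simp only [hk, if_true] at hpq; subst hpq; simp [hne]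
    · simp only [hk, Bool.false_eq_true, if_false] at hpq; subst hpq; exact hall q hq
  · rw [if_neg h]
    intro p hp
    rcases List.mem_append.mp hp with hp | hp
    · exact hall p hp
    · simp only [List.mem_singleton] at hp; subst hp; simp [hne]

theorem pv_guard_elim (l : List (String × Int)) (d : PySem.Dict Int (List String)) :
    l.foldl (fun d p =>
        let d' := if d.contains p.2 then d else d.insert p.2 ([] : List String)
        d'.modify p.2 [] (fun s => s ++ [p.1])) d
      = l.foldl (fun d p => d.modify p.2 [] (fun s => s ++ [p.1])) d := by
  induction l generalizing d with
  | nil => rfl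
  | cons p tl ih =>
    simp only [List.foldl_cons]
    rw [← ih]
    congr 1
    by_cases h : d.contains p.2
    · simp [h]
    · simp only [h, Bool.false_eq_true, if_false]
      unfold PySem.Dict.modify
      rw [PySem.Dict.getD_insert_self, pv_insert_insert d p.2 [] _ (by simpa using h),
        pv_getD_of_not_contains d p.2 [] (by simpa using h)]

theorem pv_rev_getD (l : List (String × Int)) (c : Int) :
    (l.foldl (fun d p => d.modify p.2 [] (fun s => s ++ [p.1]))
        (PySem.Dict.empty : PySem.Dict Int (List String))).getD c []
      = (l.filter (fun p => p.2 == c)).map (fun p => p.1) := by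
  have hs : l.foldl (fun d p => d.modify p.2 [] (fun s => s ++ [p.1]))
        (PySem.Dict.empty : PySem.Dict Int (List String))
      = (l.map Prod.swap).foldl (fun d p => d.modify p.1 [] (fun s => s ++ [p.2]))
        PySem.Dict.empty := by
    rw [List.foldl_map]; rfl
  rw [hs, PySem.Dict.getD_foldl_modify_append]
  rw [List.filter_map]
  simp only [List.map_map]
  have h0 : (PySem.Dict.empty : PySem.Dict Int (List String)).getD c [] = [] := rfl
  rw [h0, List.nil_append]
  rfl

theorem pv_rev_keys (l : List (String × Int)) :
    (l.foldl (fun d p => d.modify p.2 [] (fun s => s ++ [p.1]))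
        (PySem.Dict.empty : PySem.Dict Int (List String))).keys
      = PySem.List.dedup (l.map (fun p => p.2)) := by
  have := PySem.Dict.keys_foldl_modify_key l (fun p : String × Int => p.2)
    ([] : List String) (fun _ p => fun s => s ++ [p.1]) PySem.Dict.empty
  rw [this, PySem.List.dedup_eq_ofList]
  rfl

theorem pv_items_foldl_insert {κ ν : Type} [BEq κ] [LawfulBEq κ]
    (ks : List κ) (g : κ → ν) (d : PySem.Dict κ ν)
    (hd : ∀ i ∈ ks, d.contains i = false) (hn : ks.Nodup) :
    (ks.foldl (fun d i => d.insert i (g i)) d).items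
      = d.items ++ ks.map (fun i => (i, g i)) := by
  induction ks generalizing d with
  | nil => simp
  | cons k tl ih =>
    simp only [List.foldl_cons, List.map_cons]
    have hk : d.contains k = false := hd k List.mem_cons_self
    have h1 : (d.insert k (g k)).items = d.items ++ [(k, g k)] := by
      unfold PySem.Dict.insert; rw [hk]; simp
    rw [ih (d.insert k (g k))
      (fun i hi => pv_contains_insert_of_ne d k i (g k)
        (hd i (List.mem_cons_of_mem _ hi))
        (fun he => ((List.nodup_cons.mp hn).1 (he ▸ hi))))
      (List.nodup_cons.mp hn).2, h1]
    simp

theorem pv_sorted_snoc {α κ : Type} [LinearOrder κ] (l : List α) (x : α) (key : α → κ) :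
    PySem.List.sorted (l ++ [x]) key false
      = PySem.List.insertBy (fun a b => decide (key a < key b)) x
          (PySem.List.sorted l key false) := by
  rw [PySem.List.sorted_eq_foldl_insertBy, PySem.List.sorted_eq_foldl_insertBy,
    List.foldl_append]
  rfl

theorem pv_insertBy_append {α : Type} (before : α → α → Bool) (x : α) (L t : List α)
    (h : ∀ y ∈ L, before x y = false) :
    PySem.List.insertBy before x (L ++ t) = L ++ PySem.List.insertBy before x t := by
  induction L with
  | nil => rfl
  | cons y L ih =>
    have hy : before x y = false := h y (List.mem_cons_self)
    simp only [List.cons_append, PySem.List.insertBy, hy, Bool.false_eq_true, if_false]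
    rw [ih (fun z hz => h z (List.mem_cons_of_mem _ hz))]

theorem pv_insertBy_head {α : Type} (before : α → α → Bool) (x : α) (l : List α)
    (h : ∀ y, l.head? = some y → before x y = true) :
    PySem.List.insertBy before x l = x :: l := by
  cases l with
  | nil => rfl
  | cons y t => simp [PySem.List.insertBy, h y rfl]

theorem pv_dropWhile_head_false {α : Type} (p : α → Bool) (l : List α) (r : α) (R1 : List α)
    (h : l.dropWhile p = r :: R1) : p r = false := by
  induction l with
  | nil => simp [List.dropWhile] at h
  | cons a t ih =>
    rw [List.dropWhile_cons] at h
    split at h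
    · exact ih h
    · next hpa =>
      cases h
      simpa using hpa

theorem pv_mem_filter_snd {l : List (String × Int)} {c : Int} {y : String × Int}
    (h : y ∈ l.filter (fun p => p.2 == c)) : y.2 = c := by
  have := (List.mem_filter.mp h).2
  simpa using this

theorem pv_main (l : List (String × Int)) :
    PySem.List.sorted l (fun p => p.2) false
      = (PySem.List.sorted (PySem.List.dedup (l.map (fun p => p.2))) (fun x => x) false).flatMap
          (fun c => l.filter (fun p => p.2 == c)) := by
  induction l using List.reverseRecOn with
  | nil => rfl
  | append_singleton l x ih =>
    set key : (String × Int) → Int := fun p => p.2 with hkeydef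
    set c0 : Int := x.2 with hc0def
    set ks : List Int := PySem.List.sorted (PySem.List.dedup (l.map key)) (fun x => x) false with hksdef
    set g : Int → List (String × Int) := fun c => l.filter (fun p => p.2 == c) with hgdef
    set g' : Int → List (String × Int) := fun c => (l ++ [x]).filter (fun p => p.2 == c) with hg'def
    have hpw : ks.Pairwise (· < ·) := by
      rw [hksdef, PySem.List.dedup_eq_ofList]
      exact PySem.List.sorted_ofList_pairwise_lt _
    have hksmem : ∀ c, c ∈ ks ↔ c ∈ l.map key := by
      intro c
      rw [hksdef, PySem.List.mem_sorted, PySem.List.mem_dedup]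
    have hndks : ks.Nodup := hpw.imp ne_of_lt
    set L : List Int := ks.takeWhile (fun c => decide (c < c0)) with hLdef
    set R0 : List Int := ks.dropWhile (fun c => decide (c < c0)) with hR0def
    have hLR : L ++ R0 = ks := List.takeWhile_append_dropWhile
    have hL : ∀ c ∈ L, c < c0 := fun c hc => by
      have := List.mem_takeWhile_imp hc; simpa using this
    have hpwsplit := List.pairwise_append.mp (hLR ▸ hpw)
    have hR0ge : ∀ c ∈ R0, c0 ≤ c := by
      intro c hc
      cases hR : R0 with
      | nil => rw [hR] at hc; cases hc
      | cons r R1 =>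
        have hrhead : decide (r < c0) = false :=
          pv_dropWhile_head_false _ ks r R1 (by rw [← hR0def]; exact hR)
        simp at hrhead
        rw [hR] at hc
        rcases List.mem_cons.mp hc with rfl | hc1
        · omega
        · have : r < c := (List.pairwise_cons.mp (hR ▸ hpwsplit.2.1)).1 c hc1
          omega
    -- obtain the common shape ks' = L ++ c0 :: R
    obtain ⟨R, hks', hRgt, hsplit⟩ :
        ∃ R : List Int,
          PySem.List.sorted (PySem.List.dedup ((l ++ [x]).map key)) (fun x => x) false
              = L ++ c0 :: R ∧
          (∀ c ∈ R, c0 < c) ∧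
          ks.flatMap g = (L.flatMap g ++ g c0) ++ R.flatMap g := by
      by_cases hc0 : c0 ∈ ks
      · -- c0 already a key: R0 = c0 :: R
        have hc0R0 : c0 ∈ R0 := by
          rcases List.mem_append.mp (hLR ▸ hc0) with h | h
          · exact absurd (hL _ h) (lt_irrefl c0)
          · exact h
        obtain ⟨r, R1, hR⟩ := List.exists_cons_of_ne_nil (List.ne_nil_of_mem hc0R0)
        have hr : r = c0 := by
          rcases List.mem_cons.mp (hR ▸ hc0R0) with h | h
          · omega
          · have h1 : r < c0 := (List.pairwise_cons.mp (hR ▸ hpwsplit.2.1)).1 c0 h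
            have h2 : c0 ≤ r := hR0ge r (by rw [hR]; exact List.mem_cons_self)
            omega
        subst hr
        have hksform : ks = L ++ c0 :: R1 := by rw [← hLR, hR]
        refine ⟨R1, ?_, ?_, ?_⟩
        · rw [← hksform]
          apply PySem.List.sorted_eq_of_perm_of_pairwise_lt
          · refine (List.perm_ext_iff_of_nodup hndks (by
              rw [PySem.List.dedup_eq_ofList]; exact PySem.Set.nodup_ofList _)).mpr ?_
            intro a
            rw [PySem.List.dedup_eq_ofList, PySem.Set.mem_ofList, List.map_append,
              List.mem_append]
            constructor
            · intro ha
              exact Or.inl ((hksmem a).mp ha)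
            · rintro (ha | ha)
              · exact (hksmem a).mpr ha
              · simp only [List.map_cons, List.map_nil, List.mem_singleton] at ha
                subst ha
                exact hc0
          · exact hpw
        · intro c hc
          exact (List.pairwise_cons.mp (hR ▸ hpwsplit.2.1)).1 c hc
        · rw [hksform]
          simp [List.flatMap_append, List.flatMap_cons, List.append_assoc]
      · -- c0 is a new key: g c0 = [] and ks' = L ++ c0 :: R0
        have hgc0 : g c0 = [] := by
          rw [hgdef]
          rw [List.filter_eq_nil_iff]
          intro p hp hbeq
          apply hc0
          rw [hksmem]
          have : p.2 = c0 := by simpa using hbeq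
          exact this ▸ List.mem_map_of_mem hp
        have hR0gt : ∀ c ∈ R0, c0 < c := by
          intro c hc
          have h1 := hR0ge c hc
          have h2 : c ≠ c0 := by
            intro h; apply hc0; rw [← hLR]; exact List.mem_append.mpr (Or.inr (h ▸ hc))
          omega
        refine ⟨R0, ?_, hR0gt, ?_⟩
        · apply PySem.List.sorted_eq_of_perm_of_pairwise_lt
          · have hnd : (L ++ c0 :: R0).Nodup := by
              refine (List.pairwise_append.mpr ⟨hpwsplit.1, ?_, ?_⟩).imp ne_of_lt
              · exact List.pairwise_cons.mpr ⟨hR0gt, hpwsplit.2.1⟩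
              · intro a ha b hb
                rcases List.mem_cons.mp hb with rfl | hb
                · exact hL a ha
                · exact hpwsplit.2.2 a ha b hb
            refine (List.perm_ext_iff_of_nodup hnd (by
              rw [PySem.List.dedup_eq_ofList]; exact PySem.Set.nodup_ofList _)).mpr ?_
            intro a
            rw [PySem.List.dedup_eq_ofList, PySem.Set.mem_ofList, List.map_append,
              List.mem_append]
            simp only [List.mem_append, List.mem_cons, List.map_cons, List.map_nil,
              List.not_mem_nil, or_false]
            constructor
            · rintro (h | rfl | h)
              · exact Or.inl ((hksmem a).mp (by rw [← hLR]; exact List.mem_append.mpr (Or.inl h)))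
              · exact Or.inr rfl
              · exact Or.inl ((hksmem a).mp (by rw [← hLR]; exact List.mem_append.mpr (Or.inr h)))
            · rintro (h | rfl)
              · have h1 : a ∈ L ++ R0 := by rw [hLR]; exact (hksmem a).mpr h
                rcases List.mem_append.mp h1 with h2 | h2
                · exact Or.inl h2
                · exact Or.inr (Or.inr h2)
              · exact Or.inr (Or.inl rfl)
          · refine List.pairwise_append.mpr ⟨hpwsplit.1, ?_, ?_⟩
            · exact List.pairwise_cons.mpr ⟨hR0gt, hpwsplit.2.1⟩
            · intro a ha b hb
              rcases List.mem_cons.mp hb with rfl | hb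
              · exact hL a ha
              · exact hpwsplit.2.2 a ha b hb
        · rw [← hLR]
          simp [List.flatMap_append, hgc0]
    -- the common computation
    have hL' : ∀ y ∈ L.flatMap g ++ g c0, (fun a b : String × Int => decide (a.2 < b.2)) x y = false := by
      intro y hy
      rcases List.mem_append.mp hy with h | h
      · obtain ⟨c, hcL, hyg⟩ := List.mem_flatMap.mp h
        have : y.2 = c := pv_mem_filter_snd hyg
        have := hL c hcL
        simp only [decide_eq_false_iff_not, not_lt, ← hc0def]
        omega
      · have : y.2 = c0 := pv_mem_filter_snd h
        simp only [decide_eq_false_iff_not, not_lt, ← hc0def]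
        omega
    have hR' : ∀ y, (R.flatMap g).head? = some y →
        (fun a b : String × Int => decide (a.2 < b.2)) x y = true := by
      intro y hy
      have hmem : y ∈ R.flatMap g := List.mem_of_mem_head? hy
      obtain ⟨c, hcR, hyg⟩ := List.mem_flatMap.mp hmem
      have h1 : y.2 = c := pv_mem_filter_snd hyg
      have h2 := hRgt c hcR
      simp only [decide_eq_true_eq, ← hc0def]
      omega
    have hgL : ∀ c ∈ L, g' c = g c := by
      intro c hc
      rw [hg'def, hgdef]
      simp only [List.filter_append]
      have : (x.2 == c) = false := by
        have := hL c hc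
        simp only [beq_eq_false_iff_ne, ← hc0def]
        omega
      simp [this]
    have hgR : ∀ c ∈ R, g' c = g c := by
      intro c hc
      rw [hg'def, hgdef]
      simp only [List.filter_append]
      have : (x.2 == c) = false := by
        have := hRgt c hc
        simp only [beq_eq_false_iff_ne, ← hc0def]
        omega
      simp [this]
    have hgc0' : g' c0 = g c0 ++ [x] := by
      rw [hg'def, hgdef]
      simp only [List.filter_append]
      simp [← hc0def]
    rw [pv_sorted_snoc, ih, hks', hsplit,
      pv_insertBy_append _ _ _ _ hL', pv_insertBy_head _ _ _ hR']
    rw [List.flatMap_append, List.flatMap_cons,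
      List.flatMap_congr hgL, List.flatMap_congr hgR, hgc0']
    simp [List.append_assoc]

theorem pv_inner_spec (c : Int) (grp rest : List (String × Int)) (acc : List String)
    (hg : ∀ p ∈ grp, p.2 = c) (hr : ∀ q, rest.head? = some q → q.2 ≠ c) :
    pvInnerB c (grp ++ rest) acc = (acc ++ grp.map (fun p => p.1), rest) := by
  induction grp generalizing acc with
  | nil =>
    cases rest with
    | nil => simp [pvInnerB]
    | cons q tl =>
      have : (q.2 == c) = false := by simpa using hr q rfl
      simp [pvInnerB, this]
  | cons p grp ih =>
    have hp : (p.2 == c) = true := by simpa using hg p List.mem_cons_self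
    simp only [List.cons_append, pvInnerB, hp, if_true]
    rw [ih _ (fun z hz => hg z (List.mem_cons_of_mem _ hz))]
    simp

theorem pv_runs_flatMap (ks : List Int) (g : Int → List (String × Int)) (out : List String)
    (hpw : ks.Pairwise (· < ·))
    (hne : ∀ c ∈ ks, g c ≠ [])
    (hkey : ∀ c ∈ ks, ∀ p ∈ g c, p.2 = c) :
    pvRunsB (ks.flatMap g) out
      = ks.foldl (fun acc c =>
          acc ++ ["Present " ++ PySem.Int.toStr c ++ "x: " ++
            PySem.Int.toStr (PySem.List.len ((g c).map (fun p => p.1))) ++ " - " ++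
            PySem.Str.join ", " ((g c).map (fun p => p.1)) ++ "\n"]) out := by
  induction ks generalizing out with
  | nil => simp [pvRunsB]
  | cons c ks ih =>
    have hgc : g c ≠ [] := hne c List.mem_cons_self
    obtain ⟨q, gr, hq⟩ := List.exists_cons_of_ne_nil hgc
    have hflat : (c :: ks).flatMap g = q :: (gr ++ ks.flatMap g) := by
      simp [List.flatMap_cons, hq]
    rw [hflat, pvRunsB]
    have hq2 : q.2 = c := hkey c List.mem_cons_self q (hq ▸ List.mem_cons_self)
    have hinner : pvInnerB q.2 (gr ++ ks.flatMap g) [q.1]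
        = ([q.1] ++ gr.map (fun p => p.1), ks.flatMap g) := by
      rw [hq2]
      refine pv_inner_spec c gr (ks.flatMap g) [q.1] ?_ ?_
      · intro p hp; exact hkey c List.mem_cons_self p (hq ▸ List.mem_cons_of_mem _ hp)
      · intro r hr hc
        have hrmem : r ∈ ks.flatMap g := by
          cases hks : ks.flatMap g with
          | nil => rw [hks] at hr; simp at hr
          | cons a t => rw [hks] at hr; simp at hr; subst hr; simp
        obtain ⟨c', hc', hrg⟩ := List.mem_flatMap.mp hrmem
        have : r.2 = c' := hkey c' (List.mem_cons_of_mem _ hc') r hrg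
        have hlt : c < c' := (List.pairwise_cons.mp hpw).1 c' hc'
        rw [hc] at this; omega
    simp only [hinner, List.foldl_cons]
    rw [ih _ (List.pairwise_cons.mp hpw).2
      (fun z hz => hne z (List.mem_cons_of_mem _ hz))
      (fun z hz => hkey z (List.mem_cons_of_mem _ hz))]
    congr 1
    simp [hq, hq2, PySem.List.len]

-- ===== VERDICT (by name: the statement is the Claim_ definition above) =====
theorem pv_join_empty_foldl (l : List String) (init : String) :
    init ++ PySem.Str.join "" l = l.foldl (fun a s => a ++ s) init := by
  induction l generalizing init with
  | nil =>
    have h : PySem.Str.join "" ([] : List String) = "" := by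
      simp [PySem.Str.join, PySem.Chars.join_nil]
    simp [h]
  | cons a t ih =>
    cases t with
    | nil =>
      have h : PySem.Str.join "" [a] = a := by
        simp [PySem.Str.join, PySem.Chars.join_singleton]
      simp [h]
    | cons b t =>
      have h : PySem.Str.join "" (a :: b :: t) = a ++ PySem.Str.join "" (b :: t) := by
        simp [PySem.Str.join, PySem.Chars.join_cons_cons]
      rw [h, ← String.append_assoc, ih]
      rfl

theorem pv_foldl_ext {α β : Type} (f g : α → β → α) (h : ∀ a b, f a b = g a b)
    (init : α) (l : List β) : l.foldl f init = l.foldl g init := by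
  have hfg : f = g := funext fun a => funext fun b => h a b
  rw [hfg]

theorem pv_join_lines (ks : List Int) (f : Int → String) :
    PySem.Str.join "" (ks.foldl (fun acc c => acc ++ [f c]) []) = ks.foldl (fun acc c => acc ++ f c) "" := by
  have h1 : ks.foldl (fun acc c => acc ++ [f c]) ([] : List String) = ks.map f := by
    rw [PySem.List.foldl_append_eq_flatMap]
    rw [List.nil_append]
    induction ks with
    | nil => rfl
    | cons a t ih => simp [ih]
  have h2 := pv_join_empty_foldl (ks.map f) ""
  rw [List.foldl_map] at h2
  rw [h1, ← h2]
  simp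

theorem pv_empty_items {κ ν : Type} : (PySem.Dict.empty : PySem.Dict κ ν).items = [] := rfl

theorem conciseStringReport_spec : Claim_equal_conciseStringReport := by
  intro strings counts _
  unfold Spec_conciseStringReport
  simp only [conciseStringReport, conciseStringReport_alt]
  set l := ((strings.zip counts).foldl (fun d p => d.insert p.1 p.2)
    (PySem.Dict.empty : PySem.Dict String Int)).items with hl
  have hpw : (PySem.List.sorted (PySem.List.dedup (l.map (fun p => p.2))) (fun x => x) false).Pairwise (· < ·) := by
    rw [PySem.List.dedup_eq_ofList]
    exact PySem.List.sorted_ofList_pairwise_lt _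
  have hnd : (PySem.List.sorted (PySem.List.dedup (l.map (fun p => p.2))) (fun x => x) false).Nodup :=
    hpw.imp ne_of_lt
  have hne : ∀ c ∈ PySem.List.sorted (PySem.List.dedup (l.map (fun p => p.2))) (fun x => x) false,
      l.filter (fun p => p.2 == c) ≠ [] := by
    intro c hc
    rw [PySem.List.mem_sorted, PySem.List.mem_dedup] at hc
    obtain ⟨p, hp, hpc⟩ := List.mem_map.mp hc
    exact List.ne_nil_of_mem (List.mem_filter.mpr ⟨hp, by simp [hpc]⟩)
  have hkey : ∀ c ∈ PySem.List.sorted (PySem.List.dedup (l.map (fun p => p.2))) (fun x => x) false,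
      ∀ p ∈ l.filter (fun p => p.2 == c), p.2 = c :=
    fun c _ p hp => pv_mem_filter_snd hp
  rw [pv_guard_elim, pv_rev_keys, pv_main,
    pv_runs_flatMap _ _ _ hpw hne hkey,
    pv_items_foldl_insert _ _ _ (fun i _ => rfl) hnd]
  simp only [pv_empty_items, List.nil_append, List.foldl_map, pv_rev_getD]
  rw [pv_join_lines]
  congr 1
  exact pv_foldl_ext _ _ (fun a c => by simp [String.append_assoc]) _ _
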